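-- pv_equiv track=rewrite | github.com/srbehera/DRAGEN_Analysis | 1kg_summary/count_gt.py | subset_gtmap
-- ===== SOURCE A (Python) =====
-- def subset_gtmap(sample_cohort_dict, gtmap_dict):
--
--     cohort_gtmap_dict = dict()
--     for gt, slist in gtmap_dict.items():
--         for sample in slist:
--             cohort_list = sample_cohort_dict[sample]
--             for cohort in cohort_list:
--                 if cohort not in cohort_gtmap_dict:
--                     cohort_gtmap_dict[cohort] = dict()
--                 if gt not in cohort_gtmap_dict[cohort]:
--                     cohort_gtmap_dict[cohort][gt] = 0
--                 cohort_gtmap_dict[cohort][gt] += 1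
--
--     return cohort_gtmap_dict
-- ===== SOURCE B (Python) =====
-- def subset_gtmap(sample_cohort_dict, gtmap_dict):
--     # Phase 1: flatten to (cohort, gt) pairs (KeyError preserved for missing samples).
--     pairs = [(cohort, gt)
--              for gt, slist in gtmap_dict.items()
--              for sample in slist
--              for cohort in sample_cohort_dict[sample]]
--     # Phase 2: tally the flat pairs once, in one flat dict keyed by (cohort, gt).
--     counts = {}
--     for key in pairs:
--         counts[key] = counts.get(key, 0) + 1
--     # Phase 3: pivot the flat counts into the nested result.
--     result = {}
--     for (cohort, gt), n in counts.items():
--         if cohort not in result: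
--             result[cohort] = {}
--         result[cohort][gt] = n
--     return result
-- ===== Notes on version B (the rewrite author's own statement) =====
-- stated objective: alternative
-- what changed: A tallies with nested in-place dict increments inside a triple loop; B flattens to a (cohort, gt) pair list, tallies once in a single flat dict keyed by (cohort, gt), and then pivots that tally into the nested result.
import Mathlib
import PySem

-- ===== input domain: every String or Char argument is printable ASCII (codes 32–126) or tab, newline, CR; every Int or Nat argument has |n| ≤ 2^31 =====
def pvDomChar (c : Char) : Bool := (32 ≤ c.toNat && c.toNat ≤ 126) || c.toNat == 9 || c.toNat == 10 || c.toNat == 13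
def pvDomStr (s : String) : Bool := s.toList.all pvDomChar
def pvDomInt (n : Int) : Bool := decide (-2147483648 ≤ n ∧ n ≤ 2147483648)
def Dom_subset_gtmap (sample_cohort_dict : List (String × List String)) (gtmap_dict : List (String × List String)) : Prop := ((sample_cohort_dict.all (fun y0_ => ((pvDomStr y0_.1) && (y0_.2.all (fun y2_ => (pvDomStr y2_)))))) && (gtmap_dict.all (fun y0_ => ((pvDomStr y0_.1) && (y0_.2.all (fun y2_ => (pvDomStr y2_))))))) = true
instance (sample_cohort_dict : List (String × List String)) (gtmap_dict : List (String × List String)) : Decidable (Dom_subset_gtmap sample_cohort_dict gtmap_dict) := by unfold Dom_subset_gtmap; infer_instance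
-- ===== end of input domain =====

-- B replaces A's nested in-place increments by flatten → one flat tally keyed by (cohort, gt) → pivot;
-- same cost, different decomposition (objective: alternative).

-- ===== PORT A =====
def subset_gtmap (sample_cohort_dict : List (String × List String)) (gtmap_dict : List (String × List String)) : List (String × List (String × Int)) :=
  let cohort_gtmap_dict : PySem.Dict String (PySem.Dict String Int) :=
    gtmap_dict.foldl (fun acc gp =>
      gp.2.foldl (fun acc sample =>
        let cohort_list := (PySem.Dict.mk sample_cohort_dict).getD sample []
        cohort_list.foldl (fun acc cohort =>
          let acc := if acc.contains cohort then acc else acc.insert cohort PySem.Dict.empty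
          let inner := acc.getD cohort PySem.Dict.empty
          let inner := if inner.contains gp.1 then inner else inner.insert gp.1 0
          let inner := inner.insert gp.1 (inner.getD gp.1 0 + 1)
          acc.insert cohort inner) acc) acc) PySem.Dict.empty
  cohort_gtmap_dict.items.map (fun q => (q.1, q.2.items))

-- ===== PORT B =====
def subset_gtmap_alt (sample_cohort_dict : List (String × List String)) (gtmap_dict : List (String × List String)) : List (String × List (String × Int)) :=
  let pairs : List (String × String) :=
    gtmap_dict.flatMap (fun gp => gp.2.flatMap (fun sample =>
      ((PySem.Dict.mk sample_cohort_dict).getD sample []).map (fun cohort => (cohort, gp.1))))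
  let counts : PySem.Dict (String × String) Int :=
    pairs.foldl (fun d key => d.insert key (d.getD key 0 + 1)) PySem.Dict.empty
  let result : PySem.Dict String (PySem.Dict String Int) :=
    counts.items.foldl (fun r q =>
      let r := if r.contains q.1.1 then r else r.insert q.1.1 PySem.Dict.empty
      r.insert q.1.1 ((r.getD q.1.1 PySem.Dict.empty).insert q.1.2 q.2)) PySem.Dict.empty
  result.items.map (fun q => (q.1, q.2.items))

-- ===== PRECONDITION & SPEC =====
-- Pre_ excludes exactly the inputs where some sample in a gtmap list is missing from
-- sample_cohort_dict: there Python A raises KeyError (returns nothing).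
def Pre_subset_gtmap (sample_cohort_dict : List (String × List String)) (gtmap_dict : List (String × List String)) : Prop :=
  ∀ gp ∈ gtmap_dict, ∀ s ∈ gp.2, s ∈ sample_cohort_dict.map Prod.fst
instance (sample_cohort_dict : List (String × List String)) (gtmap_dict : List (String × List String)) : Decidable (Pre_subset_gtmap sample_cohort_dict gtmap_dict) := by unfold Pre_subset_gtmap; infer_instance
def pvWitness_subset_gtmap : (List (String × List String)) × (List (String × List String)) :=
  ([("s1", ["AFR", "EUR"]), ("s2", ["AFR"])], [("0/1", ["s1", "s2"]), ("1/1", ["s2"])])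

def Spec_subset_gtmap (sample_cohort_dict : List (String × List String)) (gtmap_dict : List (String × List String)) (out : List (String × List (String × Int))) : Prop := out = subset_gtmap_alt sample_cohort_dict gtmap_dict
instance (sample_cohort_dict : List (String × List String)) (gtmap_dict : List (String × List String)) (out : List (String × List (String × Int))) : Decidable (Spec_subset_gtmap sample_cohort_dict gtmap_dict out) := by unfold Spec_subset_gtmap; infer_instance

-- ===== CLAIM (what is proved, stated in full; the proofs are below) =====
def Claim_equal_subset_gtmap : Prop := ∀ (sample_cohort_dict : List (String × List String)) (gtmap_dict : List (String × List String)), Dom_subset_gtmap sample_cohort_dict gtmap_dict → Pre_subset_gtmap sample_cohort_dict gtmap_dict → Spec_subset_gtmap sample_cohort_dict gtmap_dict (subset_gtmap sample_cohort_dict gtmap_dict)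

-- ===== LEMMAS AND PROOFS =====

def pvPairs (sample_cohort_dict : List (String × List String)) (gtmap_dict : List (String × List String)) : List (String × String) :=
  gtmap_dict.flatMap (fun gp => gp.2.flatMap (fun sample =>
    ((PySem.Dict.mk sample_cohort_dict).getD sample []).map (fun cohort => (cohort, gp.1))))

def pvStepA (acc : PySem.Dict String (PySem.Dict String Int)) (p : String × String) : PySem.Dict String (PySem.Dict String Int) :=
  let acc := if acc.contains p.1 then acc else acc.insert p.1 PySem.Dict.empty
  let inner := acc.getD p.1 PySem.Dict.empty
  let inner := if inner.contains p.2 then inner else inner.insert p.2 0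
  let inner := inner.insert p.2 (inner.getD p.2 0 + 1)
  acc.insert p.1 inner

def pvStepB (r : PySem.Dict String (PySem.Dict String Int)) (q : (String × String) × Int) : PySem.Dict String (PySem.Dict String Int) :=
  let r := if r.contains q.1.1 then r else r.insert q.1.1 PySem.Dict.empty
  r.insert q.1.1 ((r.getD q.1.1 PySem.Dict.empty).insert q.1.2 q.2)

def pvGts (ps : List (String × String)) (c : String) : List String :=
  ((PySem.List.dedup ps).filter (fun k => k.1 == c)).map Prod.snd
def pvInner (ps : List (String × String)) (c : String) : PySem.Dict String Int :=
  PySem.Dict.mk ((pvGts ps c).map (fun g => (g, (ps.count (c, g) : Int))))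
def pvOuter (ps : List (String × String)) : PySem.Dict String (PySem.Dict String Int) :=
  PySem.Dict.mk ((PySem.List.dedup (ps.map Prod.fst)).map (fun c => (c, pvInner ps c)))

-- dictionary operations on a dict in canonical "key-indexed map" form
theorem pvContains_mk_map {κ ν : Type} [BEq κ] [LawfulBEq κ] (cs : List κ) (F : κ → ν) (c : κ) :
    (PySem.Dict.mk (cs.map (fun k => (k, F k)))).contains c = cs.contains c := by
  simp only [PySem.Dict.contains, PySem.Dict.items, List.any_map, Function.comp_def]
  rw [List.any_beq']

theorem pvGetD_mk_map {κ ν : Type} [BEq κ] [LawfulBEq κ] (cs : List κ) (F : κ → ν) (c : κ) (d0 : ν) :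
    (PySem.Dict.mk (cs.map (fun k => (k, F k)))).getD c d0 = if c ∈ cs then F c else d0 := by
  induction cs with
  | nil => simp [PySem.Dict.getD, PySem.Dict.get?]
  | cons a t ih =>
    by_cases h : a = c
    · subst h; simp [PySem.Dict.getD, PySem.Dict.get?]
    · have : (a == c) = false := by simp [h]
      simp only [List.map_cons]
      rw [show (PySem.Dict.mk ((a, F a) :: t.map (fun k => (k, F k)))).getD c d0
            = (PySem.Dict.mk (t.map (fun k => (k, F k)))).getD c d0 from by
        simp [PySem.Dict.getD, PySem.Dict.get?, List.find?, this]]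
      rw [ih]
      simp [List.mem_cons, h, Ne.symm h]

theorem pvInsert_mk_map {κ ν : Type} [BEq κ] [LawfulBEq κ] (cs : List κ) (F : κ → ν) (c : κ) (v : ν) :
    (PySem.Dict.mk (cs.map (fun k => (k, F k)))).insert c v
      = PySem.Dict.mk ((PySem.Set.add cs c).map (fun k => (k, if k == c then v else F k))) := by
  by_cases h : c ∈ cs
  · apply PySem.Dict.ext
    rw [PySem.Dict.items_insert_of_contains _ _ (by rw [pvContains_mk_map]; exact List.contains_iff_mem.mpr h)]
    rw [PySem.Set.add_of_mem h]
    simp only [List.map_map, PySem.Dict.items]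
    apply List.map_congr_left
    intro k _
    by_cases hk : k = c <;> simp [hk]
  · apply PySem.Dict.ext
    rw [PySem.Dict.items_insert_of_not_contains _ _ (by rw [pvContains_mk_map]; simp [h])]
    rw [PySem.Set.add_of_not_mem h]
    simp only [List.map_append, List.map_cons, List.map_nil, PySem.Dict.items]
    congr 1
    · apply List.map_congr_left
      intro k hk
      have : (k == c) = false := by simp; rintro rfl; exact h hk
      simp [this]
    · simp

theorem pvReshape {β : Type} (l : List (String × String)) (f : String × String → β) (c : String)
    (h : ∀ k ∈ l, k.1 = c) :
    l.map (fun k => (k.2, f k)) = (l.map Prod.snd).map (fun g => (g, f (c, g))) := by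
  rw [List.map_map]
  apply List.map_congr_left
  intro k hk
  have := h k hk
  simp [Function.comp_def, ← this]

theorem pvDedup_map_dedup {α β : Type} [BEq α] [LawfulBEq α] [BEq β] [LawfulBEq β]
    (l : List α) (f : α → β) :
    PySem.List.dedup ((PySem.List.dedup l).map f) = PySem.List.dedup (l.map f) := by
  induction l using List.reverseRecOn with
  | nil => rfl
  | append_singleton t x ih =>
    by_cases h : x ∈ t
    · have hx : x ∈ PySem.List.dedup t := by rw [PySem.List.mem_dedup]; exact h
      have hfx : f x ∈ t.map f := List.mem_map_of_mem h
      simp only [PySem.List.dedup_eq_ofList] at *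
      rw [PySem.Set.ofList_append_singleton, PySem.Set.add_of_mem hx, List.map_append,
        List.map_singleton, PySem.Set.ofList_append_singleton,
        PySem.Set.add_of_mem (by rw [PySem.Set.mem_ofList]; exact hfx), ih]
    · have hx : x ∉ PySem.List.dedup t := by rw [PySem.List.mem_dedup]; exact h
      simp only [PySem.List.dedup_eq_ofList] at *
      rw [PySem.Set.ofList_append_singleton, PySem.Set.add_of_not_mem hx, List.map_append,
        List.map_singleton, PySem.Set.ofList_append_singleton, List.map_append,
        List.map_singleton, PySem.Set.ofList_append_singleton, ih]

theorem pvMem_gts (ps : List (String × String)) (c g : String) :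
    g ∈ pvGts ps c ↔ (c, g) ∈ ps := by
  unfold pvGts
  simp only [List.mem_map, List.mem_filter, PySem.List.mem_dedup, beq_iff_eq]
  constructor
  · rintro ⟨k, ⟨hk, h1⟩, h2⟩
    have : k = (c, g) := by cases k; simp_all
    rwa [this] at hk
  · intro h
    exact ⟨(c, g), ⟨h, rfl⟩, rfl⟩

-- dedup facts
theorem pvDedup_app_fst (ps : List (String × String)) (p : String × String) :
    PySem.List.dedup ((ps ++ [p]).map Prod.fst)
      = PySem.Set.add (PySem.List.dedup (ps.map Prod.fst)) p.1 := by
  simp [PySem.List.dedup_eq_ofList, PySem.Set.ofList_append_singleton]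

theorem pvDedup_app (ps : List (String × String)) (p : String × String) :
    PySem.List.dedup (ps ++ [p]) = PySem.Set.add (PySem.List.dedup ps) p := by
  simp [PySem.List.dedup_eq_ofList, PySem.Set.ofList_append_singleton]

-- pvGts / counts after appending one pair
theorem pvGts_app_of_mem (ps : List (String × String)) (p : String × String) (hm : p ∈ ps) (c' : String) :
    pvGts (ps ++ [p]) c' = pvGts ps c' := by
  unfold pvGts
  rw [pvDedup_app, PySem.Set.add_of_mem (by rw [PySem.List.mem_dedup]; exact hm)]

theorem pvGts_app_of_not_mem (ps : List (String × String)) (p : String × String) (hm : p ∉ ps) (c' : String) :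
    pvGts (ps ++ [p]) c' = pvGts ps c' ++ (if p.1 == c' then [p.2] else []) := by
  unfold pvGts
  rw [pvDedup_app, PySem.Set.add_of_not_mem (by rw [PySem.List.mem_dedup]; exact hm),
    List.filter_append, List.map_append]
  congr 1
  by_cases h : p.1 = c' <;> simp [h]

theorem pvInner_app_of_ne (ps : List (String × String)) (c g c' : String) (h : c' ≠ c) :
    pvInner (ps ++ [(c, g)]) c' = pvInner ps c' := by
  unfold pvInner
  by_cases hm : (c, g) ∈ ps
  · rw [pvGts_app_of_mem _ _ hm]
    congr 1
    apply List.map_congr_left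
    intro g' _
    simp [List.count_append, List.count_singleton, h.symm]
  · rw [pvGts_app_of_not_mem _ _ hm]
    have hb : (((c, g) : String × String).1 == c') = false := by simp [Ne.symm h]
    simp only [hb, Bool.false_eq_true, if_false, List.append_nil]
    congr 1
    apply List.map_congr_left
    intro g' _
    simp [List.count_append, List.count_singleton, h.symm]

-- the inner dict produced by the A-step equals the new closed-form inner dict, at cohort c
theorem pvStepA_outer (ps : List (String × String)) (c g : String) :
    pvStepA (pvOuter ps) (c, g) = pvOuter (ps ++ [(c, g)]) := by
  by_cases hc : c ∈ ps.map Prod.fst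
  · -- cohort already present
    have hc' : c ∈ PySem.List.dedup (ps.map Prod.fst) := by rw [PySem.List.mem_dedup]; exact hc
    unfold pvStepA pvOuter
    simp only [pvContains_mk_map, List.contains_iff_mem.mpr hc', if_true, pvGetD_mk_map,
      hc', ite_true, pvInsert_mk_map, pvDedup_app_fst, PySem.Set.add_of_mem hc']
    -- now the outer maps are over the same key list
    congr 1
    apply List.map_congr_left
    intro c' hcs
    simp only [Prod.mk.injEq, true_and]
    by_cases hcc : c' = c
    · subst hcc
      simp only [beq_self_eq_true, if_true]
      -- inner computation at cohort c'
      by_cases hg : (c', g) ∈ ps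
      · have hg' : g ∈ pvGts ps c' := (pvMem_gts _ _ _).mpr hg
        rw [show pvInner ps c' = PySem.Dict.mk ((pvGts ps c').map (fun g' => (g', (ps.count (c', g') : Int)))) from rfl]
        simp only [pvContains_mk_map, List.contains_iff_mem.mpr hg', if_true, pvGetD_mk_map, hg',
          ite_true, pvInsert_mk_map, PySem.Set.add_of_mem hg']
        unfold pvInner
        rw [pvGts_app_of_mem _ _ hg]
        congr 1
        apply List.map_congr_left
        intro g' _
        simp only [Prod.mk.injEq, true_and]
        by_cases hgg : g' = g
        · subst hgg; simp [List.count_append, List.count_singleton]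
        · simp [hgg, List.count_append, List.count_singleton, Ne.symm hgg]
      · have hg' : g ∉ pvGts ps c' := fun h => hg ((pvMem_gts _ _ _).mp h)
        rw [show pvInner ps c' = PySem.Dict.mk ((pvGts ps c').map (fun g' => (g', (ps.count (c', g') : Int)))) from rfl]
        have hgc : ((pvGts ps c').contains g) = false := by
          simp only [List.contains_iff_mem] at *; simpa using hg'
        simp only [pvContains_mk_map, hgc, Bool.false_eq_true, if_false, pvInsert_mk_map,
          PySem.Set.add_of_not_mem hg']
        rw [pvGetD_mk_map]
        have hgmem : g ∈ pvGts ps c' ++ [g] := by simp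
        simp only [hgmem, ite_true, beq_self_eq_true, if_true, pvInsert_mk_map,
          PySem.Set.add_of_mem hgmem]
        unfold pvInner
        rw [pvGts_app_of_not_mem _ _ hg]
        simp only [beq_self_eq_true, if_true]
        congr 1
        apply List.map_congr_left
        intro g' hg'mem
        simp only [Prod.mk.injEq, true_and]
        by_cases hgg : g' = g
        · subst hgg
          have : ps.count (c', g') = 0 := by
            rw [List.count_eq_zero]; exact hg
          simp [List.count_append, List.count_singleton, this]
        · simp [hgg, List.count_append, List.count_singleton, Ne.symm hgg]
    · -- untouched cohort
      have hbc : (c' == c) = false := by simp [hcc]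
      rw [hbc]
      simp only [Bool.false_eq_true, if_false]
      exact (pvInner_app_of_ne ps c g c' hcc).symm
  · -- new cohort
    have hc' : c ∉ PySem.List.dedup (ps.map Prod.fst) := fun h => hc ((PySem.List.mem_dedup _ _).mp h)
    have hm : (c, g) ∉ ps := fun h => hc (List.mem_map_of_mem h)
    have hcont : ((PySem.List.dedup (ps.map Prod.fst)).contains c) = false := by
      simp only [List.contains_iff_mem] at *; simpa using hc'
    unfold pvStepA pvOuter
    simp only [pvContains_mk_map, hcont, Bool.false_eq_true, if_false]
    rw [pvInsert_mk_map, PySem.Set.add_of_not_mem hc']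
    rw [pvGetD_mk_map]
    have hmem : c ∈ PySem.List.dedup (ps.map Prod.fst) ++ [c] := by simp
    simp only [hmem, ite_true, beq_self_eq_true, if_true]
    have hinner : (if (PySem.Dict.empty : PySem.Dict String Int).contains g = true then (PySem.Dict.empty : PySem.Dict String Int) else PySem.Dict.empty.insert g 0).insert g ((if (PySem.Dict.empty : PySem.Dict String Int).contains g = true then (PySem.Dict.empty : PySem.Dict String Int) else PySem.Dict.empty.insert g 0).getD g 0 + 1) = PySem.Dict.mk [(g, (1 : Int))] := by
      simp [PySem.Dict.contains, PySem.Dict.insert, PySem.Dict.getD, PySem.Dict.get?, PySem.Dict.empty]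
    rw [hinner]
    rw [pvInsert_mk_map, PySem.Set.add_of_mem hmem]
    rw [pvDedup_app_fst, PySem.Set.add_of_not_mem hc']
    congr 1
    apply List.map_congr_left
    intro c' hcs
    rcases List.mem_append.mp hcs with hcs | hcs
    · have hcc : c' ≠ c := fun h => hc' (h ▸ hcs)
      have hbc : (c' == c) = false := by simp [hcc]
      simp only [hbc, Bool.false_eq_true, if_false, Prod.mk.injEq, true_and]
      exact (pvInner_app_of_ne ps c g c' hcc).symm
    · have hcc : c' = c := by simpa using hcs
      subst hcc
      simp only [beq_self_eq_true, if_true, Prod.mk.injEq, true_and]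
      unfold pvInner
      rw [pvGts_app_of_not_mem _ _ hm]
      have hemp : pvGts ps c' = [] := by
        rw [List.eq_nil_iff_forall_not_mem]
        intro g' hgm'
        exact hc (List.mem_map_of_mem ((pvMem_gts ps c' g').mp hgm'))
      rw [hemp]
      simp [List.count_append, List.count_singleton, List.count_eq_zero.mpr hm]


theorem pvFilter_fst (ks : List (String × String)) (c : String) (k : String × String)
    (h : k ∈ ks.filter (fun k => k.1 == c)) : k.1 = c := by
  have := (List.mem_filter.mp h).2; simpa using this

theorem pvFoldB_eq (ks : List (String × String)) (cnt : String × String → Int) (h : ks.Nodup) :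
    (ks.map (fun k => (k, cnt k))).foldl pvStepB PySem.Dict.empty
      = PySem.Dict.mk ((PySem.List.dedup (ks.map Prod.fst)).map (fun c =>
          (c, PySem.Dict.mk ((ks.filter (fun k => k.1 == c)).map (fun k => (k.2, cnt k)))))) := by
  induction ks using List.reverseRecOn with
  | nil => rfl
  | append_singleton t k0 ih =>
    have hnd : t.Nodup := (List.nodup_append.mp h).1
    have hk0 : k0 ∉ t := by
      have hd := (List.nodup_append.mp h).2.2
      intro hm; exact hd k0 hm k0 (by simp) rfl
    obtain ⟨c, g⟩ := k0
    rw [List.map_append, List.foldl_append, ih hnd]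
    simp only [List.map_cons, List.map_nil, List.foldl_cons, List.foldl_nil]
    unfold pvStepB
    simp only []
    have hgts : ∀ c', ((t ++ [(c, g)]).filter (fun k => k.1 == c')).map (fun k => ((k.2 : String), cnt k))
        = (t.filter (fun k => k.1 == c')).map (fun k => (k.2, cnt k)) ++ (if c = c' then [(g, cnt (c, g))] else []) := by
      intro c'
      rw [List.filter_append, List.map_append]
      congr 1
      by_cases hcc : c = c' <;> simp [hcc]
    by_cases hc : c ∈ t.map Prod.fst
    · have hc' : c ∈ PySem.List.dedup (t.map Prod.fst) := by rw [PySem.List.mem_dedup]; exact hc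
      simp only [pvContains_mk_map, List.contains_iff_mem.mpr hc', if_true, pvGetD_mk_map, hc', ite_true]
      have hgnot : g ∉ (t.filter (fun k => k.1 == c)).map Prod.snd := by
        intro hgm
        rcases List.mem_map.mp hgm with ⟨k, hk, hk2⟩
        have h1 := pvFilter_fst t c k hk
        have : k = (c, g) := by cases k; simp_all
        exact hk0 (this ▸ (List.mem_filter.mp hk).1)
      have hinner2 : (PySem.Dict.mk ((t.filter (fun k => k.1 == c)).map (fun k => ((k.2 : String), cnt k)))).insert g (cnt (c, g))
          = PySem.Dict.mk ((((t.filter (fun k => k.1 == c)).map Prod.snd) ++ [g]).map (fun g' => (g', cnt (c, g')))) := by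
        rw [pvReshape _ cnt c (pvFilter_fst t c), pvInsert_mk_map, PySem.Set.add_of_not_mem hgnot]
        congr 1
        apply List.map_congr_left
        intro g' _
        by_cases hgg : g' = g
        · subst hgg; simp
        · simp [hgg]
      rw [hinner2]
      rw [pvInsert_mk_map, PySem.Set.add_of_mem hc']
      rw [show PySem.List.dedup ((t ++ [(c, g)]).map Prod.fst) = PySem.List.dedup (t.map Prod.fst) from by
        simp [PySem.List.dedup_eq_ofList, PySem.Set.ofList_append_singleton, PySem.Set.add_of_mem,
          (by rw [PySem.Set.mem_ofList]; exact hc : c ∈ PySem.Set.ofList (t.map Prod.fst))]]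
      congr 1
      apply List.map_congr_left
      intro c' hcs
      simp only [Prod.mk.injEq, true_and]
      rw [hgts c']
      by_cases hcc : c' = c
      · subst hcc
        simp only [beq_self_eq_true, if_true, ite_true]
        congr 1
        rw [List.map_append, ← pvReshape (t.filter (fun k => k.1 == c')) cnt c' (pvFilter_fst t c')]
        simp
      · have hbc : (c' == c) = false := by simp [hcc]
        have hbc2 : (c = c') = False := by simp [Ne.symm hcc]
        simp [hbc, hbc2]
    · have hc' : c ∉ PySem.List.dedup (t.map Prod.fst) := fun hx => hc ((PySem.List.mem_dedup _ _).mp hx)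
      have hcont : ((PySem.List.dedup (t.map Prod.fst)).contains c) = false := by
        rw [← Bool.not_eq_true, List.contains_iff_mem]; exact hc'
      simp only [pvContains_mk_map, hcont, Bool.false_eq_true, if_false]
      rw [pvInsert_mk_map, PySem.Set.add_of_not_mem hc']
      rw [pvGetD_mk_map]
      have hmem : c ∈ PySem.List.dedup (t.map Prod.fst) ++ [c] := by simp
      simp only [hmem, ite_true, beq_self_eq_true, if_true]
      have hinner : (PySem.Dict.empty : PySem.Dict String Int).insert g (cnt (c, g)) = PySem.Dict.mk [(g, cnt (c, g))] := by
        simp [PySem.Dict.insert, PySem.Dict.contains, PySem.Dict.empty]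
      rw [hinner]
      rw [pvInsert_mk_map, PySem.Set.add_of_mem hmem]
      rw [show PySem.List.dedup ((t ++ [(c, g)]).map Prod.fst)
            = PySem.List.dedup (t.map Prod.fst) ++ [c] from by
        simp [PySem.List.dedup_eq_ofList, PySem.Set.ofList_append_singleton,
          PySem.Set.add_of_not_mem (by rw [PySem.Set.mem_ofList]; exact hc : c ∉ PySem.Set.ofList (t.map Prod.fst))]]
      congr 1
      apply List.map_congr_left
      intro c' hcs
      simp only [Prod.mk.injEq, true_and]
      rw [hgts c']
      rcases List.mem_append.mp hcs with hcs | hcs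
      · have hcc : c' ≠ c := fun hx => hc' (hx ▸ hcs)
        have hbc : (c' == c) = false := by simp [hcc]
        have hbc2 : (c = c') = False := by simp [Ne.symm hcc]
        simp [hbc, hbc2]
      · have hcc : c' = c := by simpa using hcs
        subst hcc
        have hemp : t.filter (fun k => k.1 == c') = [] := by
          rw [List.eq_nil_iff_forall_not_mem]
          intro k hk
          exact hc (pvFilter_fst t c' k hk ▸ List.mem_map_of_mem (List.mem_filter.mp hk).1)
        simp [hemp]

theorem pvFoldA_eq_outer (ps : List (String × String)) :
    ps.foldl pvStepA PySem.Dict.empty = pvOuter ps := by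
  induction ps using List.reverseRecOn with
  | nil => rfl
  | append_singleton t p ih =>
    obtain ⟨c, g⟩ := p
    rw [List.foldl_append, List.foldl_cons, List.foldl_nil, ih, pvStepA_outer]

theorem pvA_eq (scd gtd : List (String × List String)) :
    subset_gtmap scd gtd = (pvOuter (pvPairs scd gtd)).items.map (fun q => (q.1, q.2.items)) := by
  rw [← pvFoldA_eq_outer]
  unfold subset_gtmap pvPairs
  simp only [List.foldl_flatMap, List.foldl_map]
  rfl

theorem pvB_eq (scd gtd : List (String × List String)) :
    subset_gtmap_alt scd gtd = (pvOuter (pvPairs scd gtd)).items.map (fun q => (q.1, q.2.items)) := by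
  change ((((pvPairs scd gtd).foldl (fun d key => d.insert key (d.getD key 0 + 1)) PySem.Dict.empty).items.foldl pvStepB PySem.Dict.empty).items.map (fun q => (q.1, q.2.items))) = _
  rw [PySem.Dict.foldl_insert_getD_add_one_eq_counter (pvPairs scd gtd), PySem.Dict.items_counter]
  rw [← PySem.List.dedup_eq_ofList]
  rw [pvFoldB_eq _ _ (PySem.List.nodup_dedup _)]
  rw [pvDedup_map_dedup]
  unfold pvOuter
  congr 2
  apply PySem.Dict.ext
  show _ = _
  apply List.map_congr_left
  intro c _
  unfold pvInner pvGts
  congr 2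
  rw [pvReshape _ _ c (pvFilter_fst _ c)]

-- ===== VERDICT (by name: the statement is the Claim_ definition above) =====
theorem subset_gtmap_spec : Claim_equal_subset_gtmap := by
  intro scd gtd _ _
  show _ = _
  rw [pvA_eq, pvB_eq]
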